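-- pv_equiv track=rewrite | github.com/Shkityrk/EGE | ЕГЭ по номерам/Задание 5/5.1.py | step
-- ===== SOURCE A (Python) =====
-- def step(x1,y1, rng):
--     for _ in range (rng):
--         x1+=1
--         y1-=1
--         x1 += 1
--         y1+=1
--         x1-=1
--         y1 += 1
--         y1 += 1
--         x1-=1
--     return (x1,y1)
-- ===== SOURCE B (Python) =====
-- def step(x1, y1, rng):
--     # Closed form: each loop iteration leaves x1 unchanged and adds 2 to y1.
--     if rng > 0:
--         return (x1, y1 + 2 * rng)
--     return (x1, y1)
-- ===== Notes on version B (the rewrite author's own statement) =====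
-- stated objective: faster
-- what changed: Replaced the rng-iteration loop (whose per-iteration net effect is x1+=0, y1+=2) by the closed form (x1, y1+2*rng) for positive rng.
import Mathlib
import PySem

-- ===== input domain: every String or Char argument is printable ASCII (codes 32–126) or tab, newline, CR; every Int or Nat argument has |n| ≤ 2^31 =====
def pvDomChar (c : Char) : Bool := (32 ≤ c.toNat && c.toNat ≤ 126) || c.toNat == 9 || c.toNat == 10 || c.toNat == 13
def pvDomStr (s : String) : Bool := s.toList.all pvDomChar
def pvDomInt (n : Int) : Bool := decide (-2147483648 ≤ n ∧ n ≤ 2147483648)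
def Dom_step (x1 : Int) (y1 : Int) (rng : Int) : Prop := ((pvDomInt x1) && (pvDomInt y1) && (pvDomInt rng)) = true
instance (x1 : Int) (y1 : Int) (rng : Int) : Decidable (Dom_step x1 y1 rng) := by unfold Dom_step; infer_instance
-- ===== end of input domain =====

-- B replaces the O(rng) loop by the closed form (x1, y1 + 2*rng) for positive rng (faster).


-- ===== PORT A =====
-- loop body of A's for-loop, literal statement by statement
def stepBody (st : Int × Int) (_ : Int) : Int × Int :=
  let x1 := st.1; let y1 := st.2
  let x1 := x1 + 1
  let y1 := y1 - 1
  let x1 := x1 + 1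
  let y1 := y1 + 1
  let x1 := x1 - 1
  let y1 := y1 + 1
  let y1 := y1 + 1
  let x1 := x1 - 1
  (x1, y1)

def step (x1 : Int) (y1 : Int) (rng : Int) : Int × Int :=
  let st := (PySem.List.pyRange 0 rng 1).foldl stepBody (x1, y1)
  (st.1, st.2)

-- ===== PORT B =====
def step_alt (x1 : Int) (y1 : Int) (rng : Int) : Int × Int :=
  if rng > 0 then (x1, y1 + 2 * rng) else (x1, y1)

-- ===== PRECONDITION & SPEC =====
def Spec_step (x1 : Int) (y1 : Int) (rng : Int) (out : Int × Int) : Prop := out = step_alt x1 y1 rng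
instance (x1 : Int) (y1 : Int) (rng : Int) (out : Int × Int) : Decidable (Spec_step x1 y1 rng out) := by unfold Spec_step; infer_instance

-- ===== CLAIM (what is proved, stated in full; the proofs are below) =====
def Claim_equal_step : Prop := ∀ (x1 : Int) (y1 : Int) (rng : Int), Dom_step x1 y1 rng → Spec_step x1 y1 rng (step x1 y1 rng)

-- ===== LEMMAS AND PROOFS =====

theorem stepBody_eq (st : Int × Int) (a : Int) : stepBody st a = (st.1, st.2 + 2) := by
  simp only [stepBody, Prod.mk.injEq]; constructor <;> ring

theorem step_foldl (l : List Int) (x1 y1 : Int) :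
    l.foldl stepBody (x1, y1) = (x1, y1 + 2 * l.length) := by
  induction l generalizing y1 with
  | nil => simp
  | cons a t ih =>
    rw [List.foldl_cons, stepBody_eq, ih]
    simp only [List.length_cons, Prod.mk.injEq]; constructor <;> push_cast <;> ring

-- ===== VERDICT (by name: the statement is the Claim_ definition above) =====
theorem step_spec : Claim_equal_step := by
  intro x1 y1 rng _
  show step x1 y1 rng = step_alt x1 y1 rng
  unfold step step_alt
  rw [step_foldl]
  rw [PySem.List.length_pyRange_one]
  by_cases h : rng > 0
  · rw [if_pos h]
    have hh : ((rng - 0).toNat : Int) = rng := by omega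
    rw [hh]
  · rw [if_neg h]
    have hh : (rng - 0).toNat = 0 := by omega
    rw [hh]
    simp
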